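-- pv_equiv track=rewrite | github.com/JoeLove100/data-structures-and-algorithms | string_algorithms/suffix_array/count_sort.py | get_sorted_text
-- ===== SOURCE A (Python) =====
-- from typing import List
-- from collections import defaultdict
--
-- def get_sorted_text(text: str) -> List[int]:
--     """
--     sort the text by using counting sort and
--     return list of sorted positions
--     """
--
--     positions = [0 for _ in range(len(text))]
--     count = defaultdict(lambda : 0)
--
--     for letter in text:
--         count[letter] += 1
--
--     all_letters = sorted(count)
--     for i, letter in enumerate(all_letters[1:]):
--         count[letter] += count[all_letters[i]]
--
--     for i in list(range(len(text)))[::-1]: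
--         letter = text[i]
--         positions[i] = count[letter] - 1
--         count[letter] -= 1
--
--     return positions
-- ===== SOURCE B (Python) =====
-- def get_sorted_text(text):
--     """
--     sorted position of character i = (number of strictly smaller characters
--     anywhere) + (number of equal characters at earlier indices): computed with
--     a histogram, per-letter smaller-counts, and one forward pass
--     """
--     counts = {}
--     for ch in text:
--         counts[ch] = counts.get(ch, 0) + 1
--     smaller = {c: sum(v for d, v in counts.items() if d < c) for c in counts}
--     seen = {}
--     result = []
--     for ch in text:
--         result.append(smaller[ch] + seen.get(ch, 0))
--         seen[ch] = seen.get(ch, 0) + 1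
--     return result
-- ===== Notes on version B (the rewrite author's own statement) =====
-- stated objective: alternative
-- what changed: Replaces the counting-sort pipeline (sorted alphabet, in-place prefix sums, backward placement with decrementing cumulative counts) by a comparison-counting rank: per distinct letter the number of strictly smaller characters is summed directly from the histogram, then one forward pass emits smaller[ch] + seen-so-far[ch].
import Mathlib
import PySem

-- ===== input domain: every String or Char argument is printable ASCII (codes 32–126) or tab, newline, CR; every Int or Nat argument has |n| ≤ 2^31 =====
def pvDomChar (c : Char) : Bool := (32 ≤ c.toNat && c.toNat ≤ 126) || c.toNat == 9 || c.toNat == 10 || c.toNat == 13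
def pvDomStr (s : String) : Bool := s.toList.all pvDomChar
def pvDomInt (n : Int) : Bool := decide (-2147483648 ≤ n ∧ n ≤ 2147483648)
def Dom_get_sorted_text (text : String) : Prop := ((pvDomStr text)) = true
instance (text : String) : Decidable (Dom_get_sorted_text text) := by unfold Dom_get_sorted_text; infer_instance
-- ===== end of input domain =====

-- B replaces A's counting-sort pipeline by a direct comparison-counting rank (a different
-- algorithm of similar size; not claimed faster).


-- ===== PORT A =====
-- literal transliteration of A's counting sort (indices 'text[i]' / 'all_letters[i]' are always
-- in range in A, so they are ported with PySem.List.pyGetD; 'positions[i] = v' is List.set at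
-- i.toNat, exact for the in-range non-negative i the loop produces; 'list(range(n))[::-1]' is
-- slice? with step -1, which is never none)
def get_sorted_text (text : String) : List Int :=
  let cs := text.toList
  let n : Int := PySem.Str.len text
  -- positions = [0 for _ in range(len(text))]
  let positions : List Int := (PySem.List.pyRange 0 n 1).map (fun _ => (0 : Int))
  -- count = defaultdict(0); for letter in text: count[letter] += 1
  let count : PySem.Dict Char Int :=
    cs.foldl (fun d letter => d.modify letter 0 (· + 1)) PySem.Dict.empty
  -- all_letters = sorted(count)
  let all_letters := PySem.List.sorted count.keys (fun c => c) false
  -- for i, letter in enumerate(all_letters[1:]): count[letter] += count[all_letters[i]]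
  let count :=
    (PySem.List.enumerate (PySem.List.slice all_letters (some 1) none) 0).foldl
      (fun d p => d.modify p.2 0 (· + d.getD (PySem.List.pyGetD all_letters p.1 ' ') 0)) count
  -- for i in list(range(len(text)))[::-1]: letter = text[i]; positions[i] = count[letter]-1; count[letter] -= 1
  let st :=
    (((PySem.List.slice? (PySem.List.pyRange 0 n 1) none none (-1)).getD []).foldl
      (fun (st : List Int × PySem.Dict Char Int) i =>
        let letter := PySem.List.pyGetD cs i ' '
        (st.1.set i.toNat (st.2.getD letter 0 - 1), st.2.modify letter 0 (· - 1)))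
      (positions, count))
  st.1

-- ===== PORT B =====
-- literal transliteration of B: histogram 'counts' (dict.get + assignment), the dict
-- comprehension 'smaller' (iterating counts' keys, summing values of smaller keys from
-- counts.items()), then one forward pass appending smaller[ch] + seen.get(ch, 0)
-- ('smaller[ch]' is ported with getD: ch is always a key of 'smaller')
def get_sorted_text_alt (text : String) : List Int :=
  let cs := text.toList
  let counts : PySem.Dict Char Int :=
    cs.foldl (fun d ch => d.insert ch (d.getD ch 0 + 1)) PySem.Dict.empty
  let smaller : PySem.Dict Char Int :=
    counts.keys.foldl (fun d c =>
      d.insert c (((counts.items.filter (fun p => decide (p.1 < c))).map (fun p => p.2)).sum))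
      PySem.Dict.empty
  let st := cs.foldl (fun (st : List Int × PySem.Dict Char Int) ch =>
      (st.1 ++ [smaller.getD ch 0 + st.2.getD ch 0], st.2.insert ch (st.2.getD ch 0 + 1)))
      ([], PySem.Dict.empty)
  st.1

-- ===== PRECONDITION & SPEC =====
def Spec_get_sorted_text (text : String) (out : List Int) : Prop := out = get_sorted_text_alt text
instance (text : String) (out : List Int) : Decidable (Spec_get_sorted_text text out) := by unfold Spec_get_sorted_text; infer_instance

-- ===== CLAIM (what is proved, stated in full; the proofs are below) =====
def Claim_equal_get_sorted_text : Prop := ∀ (text : String), Dom_get_sorted_text text → Spec_get_sorted_text text (get_sorted_text text)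

-- ===== LEMMAS AND PROOFS =====

-- the comparison-count rank, in A's form: characters strictly smaller anywhere,
-- plus equal characters strictly earlier
def pvRank (cs : List Char) (i : Nat) : Int :=
  (cs.countP (fun x => x < cs.getD i ' ') : Int) + ((cs.take i).count (cs.getD i ' ') : Int)

-- loop 3's step function (A's backward placement loop)
def pvStep (cs : List Char) (st : List Int × PySem.Dict Char Int) (i : Int) :
    List Int × PySem.Dict Char Int :=
  let letter := PySem.List.pyGetD cs i ' '
  (st.1.set i.toNat (st.2.getD letter 0 - 1), st.2.modify letter 0 (· - 1))

-- loop 2's step function (A's prefix-sum loop)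
def pvStep2 (L : List Char) (d : PySem.Dict Char Int) (p : Int × Char) : PySem.Dict Char Int :=
  d.modify p.2 0 (· + d.getD (PySem.List.pyGetD L p.1 ' ') 0)

theorem pv_countP_or {α : Type} (l : List α) (p q : α → Bool)
    (h : ∀ x ∈ l, ¬(p x = true ∧ q x = true)) :
    l.countP (fun x => p x || q x) = l.countP p + l.countP q := by
  induction l with
  | nil => simp
  | cons x t ih =>
    have hx := h x (by simp)
    have ht : ∀ y ∈ t, ¬(p y = true ∧ q y = true) := fun y hy => h y (by simp [hy])
    simp only [List.countP_cons, ih ht]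
    cases hp : p x <;> cases hq : q x <;> simp_all <;> omega

-- countP p cs as a sum of counts over a nodup list E of representatives
theorem pv_countP_eq_sum_counts (cs E : List Char) (p : Char → Bool) (hnd : E.Nodup)
    (h1 : ∀ c ∈ E, p c = true) (h2 : ∀ x ∈ cs, p x = true → x ∈ E) :
    (cs.countP p : Int) = (E.map (fun c => (cs.count c : Int))).sum := by
  induction cs with
  | nil => simp
  | cons x t ih =>
    have ht : ∀ y ∈ t, p y = true → y ∈ E := fun y hy => h2 y (by simp [hy])
    have hsplit : (E.map (fun c => ((x :: t).count c : Int))).sum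
        = (E.map (fun c => (t.count c : Int))).sum
          + (E.map (fun c => if c == x then (1 : Int) else 0)).sum := by
      rw [← List.sum_map_add]
      congr 1
      apply List.map_congr_left
      intro c _
      simp only [List.count_cons]
      by_cases hcx : (c == x) = true
      · simp only [if_pos hcx]
        have : (x == c) = true := by rw [beq_iff_eq] at hcx ⊢; exact hcx.symm
        simp only [if_pos this]; push_cast; ring
      · have : ¬ (x == c) = true := by rw [beq_iff_eq] at hcx ⊢; exact fun e => hcx e.symm
        simp [hcx, this]
    have hind : (E.map (fun c => if c == x then (1 : Int) else 0)).sum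
        = if x ∈ E then 1 else 0 := by
      rw [PySem.List.sum_map_ite_one_zero]
      by_cases hx : x ∈ E
      · simp [hx, ← List.count_eq_countP, List.count_eq_one_of_mem hnd hx]
      · simp [hx, ← List.count_eq_countP, List.count_eq_zero_of_not_mem hx]
    rw [List.countP_cons, hsplit, ← ih ht, hind]
    by_cases hpx : p x = true
    · have := h2 x (by simp) hpx
      simp only [hpx, if_pos, this]
      push_cast; ring
    · have hxE : x ∉ E := fun hmem => hpx (h1 x hmem)
      simp only [Bool.not_eq_true] at hpx
      simp [hxE, hpx]

-- counting '≤ c' splits into counting '< c' and counting 'c' itself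
theorem pv_countP_le (cs : List Char) (c : Char) :
    cs.countP (fun x => x ≤ c) = cs.countP (fun x => x < c) + cs.count c := by
  have h : ∀ x : Char, (decide (x ≤ c)) = (decide (x < c) || (x == c)) := by
    intro x
    by_cases hle : x ≤ c
    · rcases lt_or_eq_of_le hle with hlt | heq
      · simp [le_of_lt hlt, hlt]
      · simp [heq]
    · have hnlt : ¬ x < c := fun hlt => hle (le_of_lt hlt)
      have hne : x ≠ c := fun e => hle (le_of_eq e)
      simp [hle, hnlt, hne]
  rw [List.countP_congr (fun x _ => by rw [h x]),
    pv_countP_or _ _ _ (fun x _ hand => by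
      have h1 := of_decide_eq_true hand.1
      have h2 : x = c := by simpa using hand.2
      subst h2; exact lt_irrefl _ h1),
    List.count_eq_countP]

-- a modify-fold never touching key x leaves its value alone
theorem pv_fold_modify_frozen (L : List Char) (ps : List (Int × Char)) (x : Char)
    (d : PySem.Dict Char Int) (h : ∀ p ∈ ps, p.2 ≠ x) :
    (ps.foldl (pvStep2 L) d).getD x 0 = d.getD x 0 := by
  induction ps generalizing d with
  | nil => rfl
  | cons p t ih =>
    rw [List.foldl_cons, ih _ (fun q hq => h q (by simp [hq]))]
    exact PySem.Dict.getD_modify_of_ne _ _ _ (fun e => h p (by simp) e.symm)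

-- loop 2 invariant: after the prefix-sum loop, entry k holds the sum of the
-- first k+1 original entries
theorem pv_loop2 (L : List Char) (hL : L.Pairwise (· < ·)) (d₀ : PySem.Dict Char Int)
    (k : Nat) (hk : k < L.length) :
    ((PySem.List.enumerate (L.drop 1) 0).foldl (pvStep2 L) d₀).getD (L.getD k ' ') 0
      = ((L.take (k + 1)).map (fun c => d₀.getD c 0)).sum := by
  induction L using List.reverseRecOn generalizing d₀ k with
  | nil => simp at hk
  | append_singleton M c ihM =>
    rcases M.eq_nil_or_concat'.symm with hM | hM
    case inr =>
      subst hM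
      have hk0 : k = 0 := by simp at hk; omega
      subst hk0
      simp
    case inl =>
      have hMne : M ≠ [] := by rcases hM with ⟨N, y, rfl⟩; simp
      have hMlen : 0 < M.length := List.length_pos_iff.mpr hMne
      have hML : ∀ x ∈ M, x < c := by
        have := List.pairwise_append.mp hL
        exact fun x hx => this.2.2 x hx c (by simp)
      have hMp : M.Pairwise (· < ·) := (List.pairwise_append.mp hL).1
      have hdrop : (M ++ [c]).drop 1 = M.drop 1 ++ [c] := by
        rcases hM with ⟨N, y, rfl⟩; cases N <;> simp
      rw [hdrop, PySem.List.enumerate_append, List.foldl_append]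
      -- the inner fold reads only indices of M, so pvStep2 (M ++ [c]) acts as pvStep2 M
      have hcongr : (PySem.List.enumerate (M.drop 1) 0).foldl (pvStep2 (M ++ [c])) d₀
          = (PySem.List.enumerate (M.drop 1) 0).foldl (pvStep2 M) d₀ := by
        apply PySem.List.foldl_congr_mem
        intro acc p hp
        rcases (PySem.List.mem_enumerate_iff _ _ _).mp hp with ⟨j, hj, rfl⟩
        have hjM : j < M.length := by simp at hj; omega
        simp only [pvStep2, zero_add, PySem.List.pyGetD_natCast]
        rw [List.getD_append _ _ _ _ hjM]
      rw [hcongr]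
      set dM := (PySem.List.enumerate (M.drop 1) 0).foldl (pvStep2 M) d₀ with hdM
      have hb : PySem.List.pyGetD (M ++ [c]) (0 + ((M.drop 1).length : Int)) ' '
          = M.getD (M.length - 1) ' ' := by
        rw [zero_add, PySem.List.pyGetD_natCast, List.getD_append _ _ _ _ (by simp; omega)]
        congr 1
        simp
      have hdMb : dM.getD (M.getD (M.length - 1) ' ') 0
          = (M.map (fun c => d₀.getD c 0)).sum := by
        have := ihM hMp d₀ (M.length - 1) (by omega)
        rw [this, Nat.sub_add_cancel hMlen, List.take_length]
      have hfrozen : dM.getD c 0 = d₀.getD c 0 := by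
        apply pv_fold_modify_frozen
        intro p hp
        rcases (PySem.List.mem_enumerate_iff _ _ _).mp hp with ⟨j, hj, rfl⟩
        have hmem : (M.drop 1)[j] ∈ M := List.mem_of_mem_drop (List.getElem_mem hj)
        exact ne_of_lt (hML _ hmem)
      show (pvStep2 (M ++ [c]) dM _).getD _ 0 = _
      simp only [pvStep2, hb]
      rcases Nat.lt_or_ge k M.length with hkM | hkM
      · have hget : (M ++ [c]).getD k ' ' = M.getD k ' ' := List.getD_append _ _ _ _ hkM
        have hmem : M.getD k ' ' ∈ M := by
          rw [List.getD_eq_getElem _ _ hkM]; exact List.getElem_mem hkM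
        rw [hget, PySem.Dict.getD_modify_of_ne _ _ _ (ne_of_lt (hML _ hmem)),
          ihM hMp d₀ k hkM, List.take_append_of_le_length (by omega)]
      · have hkeq : k = M.length := by simp at hk; omega
        subst hkeq
        have hget : (M ++ [c]).getD M.length ' ' = c := by
          simp [List.getD_eq_getElem?_getD]
        rw [hget, PySem.Dict.getD_modify_self, hdMb, hfrozen,
          List.take_of_length_le (by simp), List.map_append, List.sum_append]
        simp [add_comm]

-- the dictionary after loops 1+2: cumulative counts, on every letter of cs
theorem pv_count2 (cs : List Char) (c : Char) (hc : c ∈ cs) :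
    ((PySem.List.enumerate
        ((PySem.List.sorted (PySem.Dict.counter cs).keys (fun c => c) false).drop 1) 0).foldl
        (pvStep2 (PySem.List.sorted (PySem.Dict.counter cs).keys (fun c => c) false))
        (PySem.Dict.counter cs)).getD c 0
      = (cs.countP (fun x => x ≤ c) : Int) := by
  set L := PySem.List.sorted (PySem.Dict.counter cs).keys (fun c => c) false with hLdef
  have hL : L.Pairwise (· < ·) := by
    rw [hLdef, PySem.Dict.keys_counter]
    exact PySem.List.sorted_ofList_pairwise_lt cs
  have hmemL : ∀ x : Char, x ∈ L ↔ x ∈ cs := by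
    intro x
    rw [hLdef, PySem.List.mem_sorted, PySem.Dict.keys_counter, PySem.Set.mem_ofList]
  obtain ⟨k, hk, hkc⟩ := List.mem_iff_getElem.mp ((hmemL c).mpr hc)
  have hgetD : L.getD k ' ' = c := by rw [List.getD_eq_getElem _ _ hk, hkc]
  rw [← hgetD, pv_loop2 L hL _ k hk]
  have hmap : (L.take (k + 1)).map (fun c => (PySem.Dict.counter cs).getD c 0)
      = (L.take (k + 1)).map (fun c => (cs.count c : Int)) := by
    apply List.map_congr_left
    intro x _
    exact PySem.Dict.getD_counter cs x
  rw [hmap, hgetD]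
  have hpair := List.pairwise_iff_getElem.mp hL
  refine (pv_countP_eq_sum_counts cs (L.take (k + 1)) _ ?_ ?_ ?_).symm
  · exact (List.Sublist.nodup (List.take_sublist _ _)) (hL.imp ne_of_lt)
  · intro x hx
    obtain ⟨j, hj, hjx⟩ := List.mem_take_iff_getElem.mp hx
    have hjL : j < L.length := lt_of_lt_of_le (Nat.lt_of_lt_of_le hj (min_le_right _ _)) le_rfl
    rcases Nat.lt_or_ge j k with hjk | hjk
    · have := hpair j k hjL hk hjk
      simp only [decide_eq_true_eq]
      rw [← hjx, ← hkc]; exact le_of_lt this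
    · have hjk' : j = k := by omega
      subst hjk'
      simp only [decide_eq_true_eq]
      rw [← hjx, ← hkc]
  · intro x hxcs hxle
    simp only [decide_eq_true_eq] at hxle
    obtain ⟨j, hjL, hjx⟩ := List.mem_iff_getElem.mp ((hmemL x).mpr hxcs)
    have hjk : j ≤ k := by
      by_contra hgt
      have := hpair k j hk hjL (by omega)
      rw [hjx, hkc] at this
      exact absurd hxle (not_le.mpr this)
    rw [← hjx]
    exact List.mem_take_iff_getElem.mpr ⟨j, by omega, rfl⟩

-- loop 3 invariant: folding the backward loop over [m-1, …, 0] writes pvRank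
-- into the first m slots
theorem pv_loop3 (cs : List Char) (m : Nat) (pos : List Int) (d : PySem.Dict Char Int)
    (hm : m ≤ cs.length) (hlen : pos.length = cs.length)
    (hd : ∀ c ∈ cs, d.getD c 0 = (cs.countP (fun x => x < c) : Int) + ((cs.take m).count c : Int)) :
    ((((List.range m).reverse).map (fun (k : Nat) => (k : Int))).foldl (pvStep cs) (pos, d)).1
      = (List.range m).map (pvRank cs) ++ pos.drop m := by
  induction m generalizing pos d with
  | zero => simp
  | succ m ih =>
    have hmlt : m < cs.length := hm
    rw [List.range_succ, List.reverse_append, List.reverse_singleton, List.singleton_append]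
    rw [show ((m :: (List.range m).reverse).map (fun (k : Nat) => (k : Int)))
        = (m : Int) :: (((List.range m).reverse).map (fun (k : Nat) => (k : Int))) from List.map_cons ..,
      List.foldl_cons]
    set c := cs.getD m ' ' with hc
    have hcmem : c ∈ cs := by
      rw [hc, List.getD_eq_getElem _ _ hmlt]; exact List.getElem_mem hmlt
    have htake : cs.take (m + 1) = cs.take m ++ [c] := by
      rw [List.take_add_one, hc, List.getD_eq_getElem _ _ hmlt,
        List.getElem?_eq_getElem hmlt]
      rfl
    have hcount : ((cs.take (m + 1)).count c : Int) = ((cs.take m).count c : Int) + 1 := by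
      rw [htake, List.count_append]; simp
    have hstep : pvStep cs (pos, d) (m : Int)
        = (pos.set m (pvRank cs m), d.modify c 0 (· - 1)) := by
      simp only [pvStep, PySem.List.pyGetD_natCast, Int.toNat_natCast, ← hc]
      congr 2
      rw [hd c hcmem, hcount, pvRank, ← hc]
      ring
    rw [hstep]
    have hd' : ∀ c' ∈ cs, (d.modify c 0 (· - 1)).getD c' 0
        = (cs.countP (fun x => x < c') : Int) + ((cs.take m).count c' : Int) := by
      intro c' hc'
      rw [PySem.Dict.getD_modify]
      split
      · rename_i he
        rw [he, hd c hcmem, hcount]; ring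
      · rename_i hne
        rw [hd c' hc', htake, List.count_append,
          List.count_eq_zero.mpr (show c' ∉ [c] by simpa using hne)]
        push_cast; ring
    rw [ih (pos.set m (pvRank cs m)) (d.modify c 0 (· - 1)) (by omega) (by simp [hlen]) hd']
    have hdrop : (pos.set m (pvRank cs m)).drop m = pvRank cs m :: pos.drop (m + 1) := by
      rw [List.set_eq_take_append_cons_drop, if_pos (by omega),
        List.drop_left' (by rw [List.length_take]; omega)]
    rw [hdrop]
    simp

theorem pv_A_eq (text : String) :
    get_sorted_text text = (List.range text.toList.length).map (pvRank text.toList) := by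
  set cs := text.toList with hcs
  simp only [get_sorted_text, PySem.Str.len_eq, PySem.List.pyRange_zero_nat]
  rw [show (cs.foldl (fun d letter => d.modify letter 0 (· + 1)) PySem.Dict.empty)
      = PySem.Dict.counter cs from (PySem.Dict.counter_eq_foldl cs).symm]
  set L := PySem.List.sorted (PySem.Dict.counter cs).keys (fun c => c) false with hL
  rw [show PySem.List.slice L (some 1) none = L.drop 1 from by rw [PySem.List.slice_from L (by omega : (0:Int) ≤ 1)]; norm_num]
  rw [show (fun (d : PySem.Dict Char Int) (p : Int × Char) =>
      d.modify p.2 0 (· + d.getD (PySem.List.pyGetD L p.1 ' ') 0)) = pvStep2 L from rfl]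
  rw [PySem.List.slice?_none_none_neg_one, Option.getD_some]
  rw [show (fun (st : List Int × PySem.Dict Char Int) (i : Int) =>
        (st.1.set i.toNat (st.2.getD (PySem.List.pyGetD cs i ' ') 0 - 1),
         st.2.modify (PySem.List.pyGetD cs i ' ') 0 (· - 1))) = pvStep cs from rfl]
  rw [← List.map_reverse]
  rw [← hcs]
  rw [pv_loop3 cs cs.length _ _ le_rfl (by simp) (fun c hc => by
    rw [pv_count2 cs c hc, pv_countP_le, List.take_length]
    push_cast; ring)]
  simp

-- the 'smaller' dict of B holds, for each letter of cs, the number of strictly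
-- smaller characters in cs
theorem pv_smaller (cs : List Char) (ch : Char) (hch : ch ∈ cs) :
    ((PySem.Dict.counter cs).keys.foldl (fun d c =>
        d.insert c ((((PySem.Dict.counter cs).items.filter
          (fun p => decide (p.1 < c))).map (fun p => p.2)).sum)) PySem.Dict.empty).getD ch 0
      = (cs.countP (fun x => x < ch) : Int) := by
  set f : Char → Int := fun c => ((((PySem.Dict.counter cs).items.filter
    (fun p => decide (p.1 < c))).map (fun p => p.2)).sum) with hf
  have hkeys : (PySem.Dict.counter cs).keys = PySem.Set.ofList cs := PySem.Dict.keys_counter cs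
  have hnd : (PySem.Set.ofList cs).Nodup := PySem.Set.nodup_ofList cs
  have hitems := PySem.Dict.items_foldl_insert_fresh (PySem.Set.ofList cs) (fun c => c) f
      PySem.Dict.empty (fun a _ => PySem.Dict.contains_empty a) (by simpa using hnd)
  rw [hkeys]
  have hmem : (ch, f ch) ∈ ((PySem.Set.ofList cs).foldl
      (fun d c => d.insert c (f c)) PySem.Dict.empty).items := by
    rw [show ((PySem.Set.ofList cs).foldl (fun d c => d.insert c (f c)) PySem.Dict.empty)
        = ((PySem.Set.ofList cs).foldl (fun d a => d.insert ((fun c => c) a) (f a))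
            PySem.Dict.empty) from rfl, hitems]
    refine List.mem_append_right _ (List.mem_map.mpr ?_)
    exact ⟨ch, (PySem.Set.mem_ofList cs ch).mpr hch, rfl⟩
  have hndk : ((PySem.Set.ofList cs).foldl
      (fun d c => d.insert c (f c)) PySem.Dict.empty).keys.Nodup := by
    rw [show ((PySem.Set.ofList cs).foldl (fun d c => d.insert c (f c)) PySem.Dict.empty)
        = ((PySem.Set.ofList cs).foldl (fun d a => d.insert ((fun c => c) a) (f a))
            PySem.Dict.empty) from rfl]
    rw [PySem.Dict.keys, hitems]
    simp only [List.map_append, List.map_map]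
    have : (PySem.Dict.empty : PySem.Dict Char Int).items = [] := rfl
    rw [this]
    simpa [Function.comp_def] using hnd
  rw [PySem.Dict.getD_of_mem_items _ hmem hndk 0, hf]
  beta_reduce
  rw [PySem.Dict.items_counter, List.filter_map, List.map_map]
  rw [pv_countP_eq_sum_counts cs ((PySem.Set.ofList cs).filter (fun d => decide (d < ch)))
    _ (hnd.filter _) (fun c hc => (List.mem_filter.mp hc).2)
    (fun x hx hlt => List.mem_filter.mpr ⟨(PySem.Set.mem_ofList cs x).mpr hx, hlt⟩)]
  congr 1

-- the forward pass emits pvRank in order, with 'seen' the counter of the prefix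
theorem pv_fwd (cs : List Char) (g : Char → Int)
    (hg : ∀ ch ∈ cs, g ch = (cs.countP (fun x => x < ch) : Int)) :
    ∀ (suf pre : List Char), cs = pre ++ suf →
    (suf.foldl (fun (st : List Int × PySem.Dict Char Int) ch =>
        (st.1 ++ [g ch + st.2.getD ch 0], st.2.insert ch (st.2.getD ch 0 + 1)))
      ((List.range pre.length).map (pvRank cs), PySem.Dict.counter pre)).1
      = (List.range cs.length).map (pvRank cs) := by
  intro suf
  induction suf with
  | nil =>
    intro pre hpre
    rw [List.foldl_nil]
    simp at hpre
    rw [hpre]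
  | cons ch rest ih =>
    intro pre hpre
    rw [List.foldl_cons]
    have hchm : ch ∈ cs := by rw [hpre]; simp
    have hlen : pre.length < cs.length := by rw [hpre]; simp
    have hget : cs.getD pre.length ' ' = ch := by
      rw [hpre, List.getD_eq_getElem _ _ (by simpa using hlen), List.getElem_append_right le_rfl]
      simp
    have htakepre : cs.take pre.length = pre := by rw [hpre, List.take_left]
    have hval : g ch + (PySem.Dict.counter pre).getD ch 0 = pvRank cs pre.length := by
      rw [hg ch hchm, PySem.Dict.getD_counter, pvRank, hget, htakepre]
    have hres : (List.range pre.length).map (pvRank cs) ++ [g ch + (PySem.Dict.counter pre).getD ch 0]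
        = (List.range (pre ++ [ch]).length).map (pvRank cs) := by
      rw [hval]
      simp [List.range_succ]
    have hseen : (PySem.Dict.counter pre).insert ch ((PySem.Dict.counter pre).getD ch 0 + 1)
        = PySem.Dict.counter (pre ++ [ch]) := by
      rw [← PySem.Dict.foldl_insert_getD_add_one_eq_counter pre,
        ← PySem.Dict.foldl_insert_getD_add_one_eq_counter (pre ++ [ch]), List.foldl_append]
      rfl
    rw [show ((List.range pre.length).map (pvRank cs) ++ [g ch + (PySem.Dict.counter pre).getD ch 0],
        (PySem.Dict.counter pre).insert ch ((PySem.Dict.counter pre).getD ch 0 + 1))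
        = ((List.range (pre ++ [ch]).length).map (pvRank cs), PySem.Dict.counter (pre ++ [ch]))
        from by rw [hres, hseen]]
    exact ih (pre ++ [ch]) (by rw [hpre]; simp)

theorem pv_B_eq (text : String) :
    get_sorted_text_alt text = (List.range text.toList.length).map (pvRank text.toList) := by
  set cs := text.toList with hcs
  simp only [get_sorted_text_alt, PySem.Dict.foldl_insert_getD_add_one_eq_counter]
  rw [← hcs]
  set smaller := ((PySem.Dict.counter cs).keys.foldl (fun d c =>
      d.insert c ((((PySem.Dict.counter cs).items.filter
        (fun p => decide (p.1 < c))).map (fun p => p.2)).sum)) PySem.Dict.empty) with hsm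
  have hcongr : cs.foldl (fun (st : List Int × PySem.Dict Char Int) ch =>
        (st.1 ++ [smaller.getD ch 0 + st.2.getD ch 0], st.2.insert ch (st.2.getD ch 0 + 1)))
        ([], PySem.Dict.empty)
      = cs.foldl (fun (st : List Int × PySem.Dict Char Int) ch =>
        (st.1 ++ [(cs.countP (fun x => x < ch) : Int) + st.2.getD ch 0],
         st.2.insert ch (st.2.getD ch 0 + 1)))
        ([], PySem.Dict.empty) := by
    apply PySem.List.foldl_congr_mem
    intro acc ch hch
    rw [hsm, pv_smaller cs ch hch]
  rw [hcongr]
  exact pv_fwd cs _ (fun ch _ => rfl) cs [] rfl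

-- ===== VERDICT (by name: the statement is the Claim_ definition above) =====
theorem get_sorted_text_spec : Claim_equal_get_sorted_text := by
  intro text _
  show _ = _
  rw [pv_A_eq, pv_B_eq]
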